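-- pv_equiv track=rewrite | github.com/PauraviW/leetcode-problems | Algorithms/common prefix.py | commonPrefixSum
-- ===== SOURCE A (Python) =====
-- def commonPrefixSum(s):
--     pa = [0] * len(s)
--     left, right = 0, 0
--
--     for i in range(0, len(s)):
--         if i<=right:
--             if pa[i-left] < right - i +1:
--                 pa[i] = pa[i-left]
--             else:
--                 left=i
--                 while right < len(s) and s[right-left] == s[right]:
--                     right = right+1
--                 pa[i] = right-left
--                 right = right - 1
--         else:
--             left = i
--             right = i
--             while right<len(s) and s[right-left] == s[right]:
--                 right = right + 1
--             pa[i] = right-left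
--             right = right - 1
--     total_sum = len(s)
--     for i in range (1, len(s)):
--         total_sum = total_sum + pa[i]
--     return total_sum
-- ===== SOURCE B (Python) =====
-- def _lcp(x, y):
--     k = 0
--     for a, b in zip(x, y):
--         if a != b:
--             break
--         k += 1
--     return k
--
-- def commonPrefixSum(s):
--     total = 0
--     t = s
--     while t:
--         total += _lcp(s, t)
--         t = t[1:]
--     return total
-- ===== Notes on version B (the rewrite author's own statement) =====
-- stated objective: simpler
-- what changed: Replaces the Z-algorithm's maintained [left,right] window and index-copy optimization with a plain scan: for each suffix of s, count the common prefix with s directly and sum the counts.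
import Mathlib
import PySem

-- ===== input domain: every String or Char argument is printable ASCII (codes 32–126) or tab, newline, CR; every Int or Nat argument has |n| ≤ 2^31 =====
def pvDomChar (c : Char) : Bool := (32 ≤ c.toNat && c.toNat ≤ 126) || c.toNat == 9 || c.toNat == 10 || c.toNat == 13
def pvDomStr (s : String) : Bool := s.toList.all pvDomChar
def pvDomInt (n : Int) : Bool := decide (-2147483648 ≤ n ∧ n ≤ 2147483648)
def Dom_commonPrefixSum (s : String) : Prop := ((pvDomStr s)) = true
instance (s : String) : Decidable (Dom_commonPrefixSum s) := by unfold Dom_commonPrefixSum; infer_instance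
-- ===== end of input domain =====

-- B replaces A's Z-algorithm window bookkeeping by a plain per-suffix common-prefix scan (simpler, not faster).
-- All of A's indices and counters are provably nonnegative on every input, so the port keeps them as Nat.

-- ===== PORT A =====
-- the inner 'while right < len(s) and s[right-left] == s[right]: right += 1' of A, returning the final right
def pvExtend (l : List Char) (left right : Nat) : Nat :=
  if _h : right < l.length then
    if l.getD (right - left) 'A' = l.getD right 'A' then pvExtend l left (right + 1) else right
  else right
termination_by l.length - right

-- one iteration of A's main 'for i in range(0, len(s))' loop; state = (pa, left, right)
def pvStepA (l : List Char) (st : List Nat × Nat × Nat) (i : Nat) : List Nat × Nat × Nat :=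
  match st with
  | (pa, left, right) =>
    if i ≤ right then
      if pa.getD (i - left) 0 < right - i + 1 then
        (pa.set i (pa.getD (i - left) 0), left, right)
      else
        let r := pvExtend l i right
        (pa.set i (r - i), i, r - 1)
    else
      let r := pvExtend l i i
      (pa.set i (r - i), i, r - 1)

def commonPrefixSum (s : String) : Int :=
  let l := s.toList
  let n := l.length
  match (List.range n).foldl (pvStepA l) (List.replicate n 0, 0, 0) with
  | (pa, _, _) =>
    ((List.range' 1 (n - 1)).foldl (fun t i => t + pa.getD i 0) n : Nat)

-- ===== PORT B =====
-- _lcp(x, y): count matching leading characters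
def pvLcp : List Char → List Char → Nat
  | a :: x, b :: y => if a = b then pvLcp x y + 1 else 0
  | _, _ => 0

-- the 'while t: total += _lcp(s, t); t = t[1:]' loop of B
def pvSumLcp (s : List Char) : List Char → Nat
  | [] => 0
  | c :: t => pvLcp s (c :: t) + pvSumLcp s t

def commonPrefixSum_alt (s : String) : Int :=
  (pvSumLcp s.toList s.toList : Nat)

-- ===== PRECONDITION & SPEC =====
def Spec_commonPrefixSum (s : String) (out : Int) : Prop := out = commonPrefixSum_alt s
instance (s : String) (out : Int) : Decidable (Spec_commonPrefixSum s out) := by unfold Spec_commonPrefixSum; infer_instance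

-- ===== CLAIM (what is proved, stated in full; the proofs are below) =====
def Claim_equal_commonPrefixSum : Prop := ∀ (s : String), Dom_commonPrefixSum s → Spec_commonPrefixSum s (commonPrefixSum s)

-- ===== LEMMAS AND PROOFS =====

-- z-function of l at i: length of the common prefix of l and its suffix from i
def pvZ (l : List Char) (i : Nat) : Nat := pvLcp l (l.drop i)

theorem pvLcp_le_right : ∀ x y : List Char, pvLcp x y ≤ y.length := by
  intro x
  induction x with
  | nil => intro y; cases y <;> simp [pvLcp]
  | cons a x ih =>
    intro y
    cases y with
    | nil => simp [pvLcp]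
    | cons b y =>
      simp only [pvLcp, List.length_cons]
      split_ifs
      · have := ih y; omega
      · omega

theorem pvLcp_getD (d : Char) : ∀ (x y : List Char) (k : Nat), k < pvLcp x y →
    x.getD k d = y.getD k d := by
  intro x
  induction x with
  | nil => intro y k hk; cases y <;> simp [pvLcp] at hk
  | cons a x ih =>
    intro y k hk
    cases y with
    | nil => simp [pvLcp] at hk
    | cons b y =>
      simp only [pvLcp] at hk
      split_ifs at hk with hab
      · cases k with
        | zero => simpa using hab
        | succ k => simpa using ih y k (by omega)
      · omega

theorem pvLcp_mismatch (d : Char) : ∀ x y : List Char, pvLcp x y < x.length → pvLcp x y < y.length →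
    x.getD (pvLcp x y) d ≠ y.getD (pvLcp x y) d := by
  intro x
  induction x with
  | nil => intro y h1 h2; simp at h1
  | cons a x ih =>
    intro y h1 h2
    cases y with
    | nil => simp at h2
    | cons b y =>
      simp only [pvLcp, List.length_cons] at h1 h2 ⊢
      split_ifs at h1 h2 ⊢ with hab
      · simpa using ih y (by omega) (by omega)
      · simpa using hab

theorem pvLcp_ge (d : Char) : ∀ (x y : List Char) (m : Nat), m ≤ x.length → m ≤ y.length →
    (∀ k, k < m → x.getD k d = y.getD k d) → m ≤ pvLcp x y := by
  intro x
  induction x with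
  | nil => intro y m h1 h2 h3; simp at h1; omega
  | cons a x ih =>
    intro y m h1 h2 h3
    cases y with
    | nil => simp at h2; omega
    | cons b y =>
      cases m with
      | zero => omega
      | succ m =>
        have hab : a = b := by simpa using h3 0 (by omega)
        simp only [pvLcp, if_pos hab]
        have := ih y m (by simpa using h1) (by simpa using h2)
          (fun k hk => by simpa using h3 (k + 1) (by omega))
        omega

theorem pvLcp_refl : ∀ x : List Char, pvLcp x x = x.length := by
  intro x
  induction x with
  | nil => simp [pvLcp]
  | cons a x ih => simp [pvLcp, ih]

theorem getD_drop (l : List Char) (i k : Nat) (d : Char) :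
    (l.drop i).getD k d = l.getD (i + k) d := by
  simp [List.getD_eq_getElem?_getD, List.getElem?_drop]

theorem pvZ_le (l : List Char) (i : Nat) : pvZ l i ≤ l.length - i := by
  have := pvLcp_le_right l (l.drop i)
  simpa [pvZ] using this

theorem pvZ_getD (l : List Char) (i k : Nat) (d : Char) (h : k < pvZ l i) :
    l.getD k d = l.getD (i + k) d := by
  have := pvLcp_getD d l (l.drop i) k h
  rwa [getD_drop] at this

theorem pvZ_mismatch (l : List Char) (i : Nat) (d : Char) (h : i + pvZ l i < l.length) :
    l.getD (pvZ l i) d ≠ l.getD (i + pvZ l i) d := by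
  have hle := pvZ_le l i
  have h1 : pvZ l i < l.length := by omega
  have h2 : pvZ l i < (l.drop i).length := by simp [List.length_drop]; omega
  have := pvLcp_mismatch d l (l.drop i) h1 h2
  rwa [getD_drop] at this

theorem pvZ_ge (l : List Char) (i m : Nat) (d : Char) (hm : m ≤ l.length - i)
    (hmatch : ∀ k, k < m → l.getD k d = l.getD (i + k) d) : m ≤ pvZ l i := by
  have := pvLcp_ge d l (l.drop i) m (by omega) (by simp [List.length_drop]; omega)
    (fun k hk => by rw [getD_drop]; exact hmatch k hk)
  exact this

theorem pvZ_eq (l : List Char) (i m : Nat) (d : Char) (hm : m ≤ l.length - i)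
    (hmatch : ∀ k, k < m → l.getD k d = l.getD (i + k) d)
    (hstop : i + m = l.length ∨ l.getD m d ≠ l.getD (i + m) d) : pvZ l i = m := by
  have hge := pvZ_ge l i m d hm hmatch
  have hle := pvZ_le l i
  rcases hstop with hend | hmis
  · omega
  · by_contra hne
    have hlt : m < pvZ l i := by omega
    exact hmis (pvZ_getD l i m d hlt)

theorem pvZ_zero (l : List Char) : pvZ l 0 = l.length := by
  simp [pvZ, pvLcp_refl]

theorem pvGetD_set (pa : List Nat) (i j v : Nat) (h : i < pa.length) :
    (pa.set i v).getD j 0 = if j = i then v else pa.getD j 0 := by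
  simp only [List.getD_eq_getElem?_getD, List.getElem?_set]
  by_cases hji : j = i
  · subst hji; simp [h]
  · simp [hji, Ne.symm hji]

-- pa.set i (z i) preserves the pa part of the invariant
theorem pvPaUpdate (l : List Char) (pa : List Nat) (i : Nat) (hlen : pa.length = l.length)
    (hpa : ∀ j, pa.getD j 0 = if 1 ≤ j ∧ j < i then pvZ l j else 0)
    (hi : i < l.length) (h1 : 1 ≤ i) (v : Nat) (hv : v = pvZ l i) :
    ∀ j, (pa.set i v).getD j 0 = if 1 ≤ j ∧ j < i + 1 then pvZ l j else 0 := by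
  intro j
  rw [pvGetD_set pa i j v (by omega)]
  by_cases hji : j = i
  · subst hji
    rw [if_pos rfl, if_pos ⟨h1, by omega⟩, hv]
  · rw [if_neg hji, hpa j]
    split_ifs with ha hb <;> first | rfl | omega

-- pvExtend computes i + z(i) when everything below right already matches
theorem pvExtend_eq (l : List Char) (i : Nat) : ∀ r, i ≤ r → r ≤ l.length →
    (∀ k, k < r - i → l.getD k 'A' = l.getD (i + k) 'A') → pvExtend l i r = i + pvZ l i := by
  suffices H : ∀ fuel r, l.length - r = fuel → i ≤ r → r ≤ l.length →
      (∀ k, k < r - i → l.getD k 'A' = l.getD (i + k) 'A') → pvExtend l i r = i + pvZ l i by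
    intro r h1 h2 h3; exact H (l.length - r) r rfl h1 h2 h3
  intro fuel
  induction fuel with
  | zero =>
    intro r hf h1 h2 h3
    rw [pvExtend, dif_neg (by omega)]
    have hge := pvZ_ge l i (r - i) 'A' (by omega) h3
    have hle := pvZ_le l i
    omega
  | succ fuel ih =>
    intro r hf h1 h2 h3
    have hrn : r < l.length := by omega
    rw [pvExtend, dif_pos hrn]
    by_cases hc : l.getD (r - i) 'A' = l.getD r 'A'
    · rw [if_pos hc]
      apply ih (r + 1) (by omega) (by omega) (by omega)
      intro k hk
      by_cases hk' : k < r - i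
      · exact h3 k hk'
      · have hkr : k = r - i := by omega
        subst hkr
        rw [show i + (r - i) = r from by omega]
        exact hc
    · rw [if_neg hc]
      have hz : pvZ l i = r - i := by
        apply pvZ_eq l i (r - i) 'A' (by omega) h3
        right
        rw [show i + (r - i) = r from by omega]
        exact hc
      omega

-- loop invariant of A's main loop before iteration i (1 ≤ i ≤ n)
def pvInv (l : List Char) (i : Nat) (st : List Nat × Nat × Nat) : Prop :=
  i ≤ l.length ∧
  st.1.length = l.length ∧
  (∀ j, st.1.getD j 0 = if 1 ≤ j ∧ j < i then pvZ l j else 0) ∧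
  ((st.2.1 = 0 ∧ st.2.2 = 0 ∧ i = 1) ∨
   (1 ≤ st.2.1 ∧ st.2.1 < i ∧ st.2.2 + 1 = st.2.1 + pvZ l st.2.1))

theorem pvInv_intro (l : List Char) (i : Nat) (pa : List Nat) (left right : Nat)
    (h1 : i ≤ l.length) (h2 : pa.length = l.length)
    (h3 : ∀ j, pa.getD j 0 = if 1 ≤ j ∧ j < i then pvZ l j else 0)
    (h4 : (left = 0 ∧ right = 0 ∧ i = 1) ∨
      (1 ≤ left ∧ left < i ∧ right + 1 = left + pvZ l left)) :
    pvInv l i (pa, left, right) := ⟨h1, h2, h3, h4⟩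

theorem pvStepA_inv (l : List Char) (i : Nat) (st : List Nat × Nat × Nat)
    (hinv : pvInv l i st) (h1 : 1 ≤ i) (hn : i < l.length) :
    pvInv l (i + 1) (pvStepA l st i) := by
  obtain ⟨pa, left, right⟩ := st
  obtain ⟨hilen, hlen, hpa, hwin⟩ := hinv
  dsimp only at hlen hpa hwin
  simp only [pvStepA]
  by_cases hir : i ≤ right
  · rw [if_pos hir]
    have hwin2 : 1 ≤ left ∧ left < i ∧ right + 1 = left + pvZ l left := by
      rcases hwin with ⟨h0l, h0r, h0i⟩ | h2
      · exfalso; omega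
      · exact h2
    obtain ⟨hl1, hli, hw⟩ := hwin2
    have hLle : pvZ l left ≤ l.length - left := pvZ_le l left
    have hrn : right < l.length := by omega
    have hj1 : 1 ≤ i - left := by omega
    have hpaj : pa.getD (i - left) 0 = pvZ l (i - left) := by
      rw [hpa]
      rw [if_pos ⟨hj1, by omega⟩]
    have hwm : ∀ p, p < pvZ l left → l.getD p 'A' = l.getD (left + p) 'A' :=
      fun p hp => pvZ_getD l left p 'A' hp
    rw [hpaj]
    by_cases hc : pvZ l (i - left) < right - i + 1
    · rw [if_pos hc]
      have hzj := pvZ_le l (i - left)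
      have hzi : pvZ l i = pvZ l (i - left) := by
        apply pvZ_eq l i (pvZ l (i - left)) 'A' (by omega)
        · intro k hk
          rw [pvZ_getD l (i - left) k 'A' hk, hwm ((i - left) + k) (by omega)]
          congr 1
          omega
        · right
          have hmis := pvZ_mismatch l (i - left) 'A' (by omega)
          rw [show i + pvZ l (i - left) = left + ((i - left) + pvZ l (i - left)) from by omega,
            ← hwm ((i - left) + pvZ l (i - left)) (by omega)]
          exact hmis
      exact pvInv_intro l (i + 1) _ left right (by omega) (by simpa using hlen)
        (pvPaUpdate l pa i hlen hpa hn h1 _ hzi.symm) (Or.inr ⟨hl1, by omega, hw⟩)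
    · rw [if_neg hc]
      have hext : pvExtend l i right = i + pvZ l i := by
        apply pvExtend_eq l i right hir (by omega)
        intro k hk
        rw [pvZ_getD l (i - left) k 'A' (by omega), hwm ((i - left) + k) (by omega)]
        congr 1
        omega
      exact pvInv_intro l (i + 1) _ i (pvExtend l i right - 1) (by omega) (by simpa using hlen)
        (pvPaUpdate l pa i hlen hpa hn h1 _ (by omega)) (Or.inr ⟨h1, by omega, by omega⟩)
  · rw [if_neg hir]
    have hext : pvExtend l i i = i + pvZ l i := by
      apply pvExtend_eq l i i (le_refl i) (by omega)
      intro k hk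
      omega
    exact pvInv_intro l (i + 1) _ i (pvExtend l i i - 1) (by omega) (by simpa using hlen)
      (pvPaUpdate l pa i hlen hpa hn h1 _ (by omega)) (Or.inr ⟨h1, by omega, by omega⟩)

theorem pvFold_inv (l : List Char) : ∀ (k i : Nat) (st : List Nat × Nat × Nat),
    pvInv l i st → 1 ≤ i → i + k ≤ l.length →
    pvInv l (i + k) ((List.range' i k).foldl (pvStepA l) st) := by
  intro k
  induction k with
  | zero => intro i st h _ _; simpa using h
  | succ k ih =>
    intro i st h h1 hk
    rw [List.range'_succ, List.foldl_cons]
    have := ih (i + 1) (pvStepA l st i) (pvStepA_inv l i st h h1 (by omega)) (by omega) (by omega)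
    rwa [show i + 1 + k = i + (k + 1) from by omega] at this

theorem pvSumLcp_eq (l : List Char) : ∀ i, i ≤ l.length →
    pvSumLcp l (l.drop i) = ((List.range' i (l.length - i)).map (pvZ l)).sum := by
  suffices H : ∀ fuel i, l.length - i = fuel → i ≤ l.length →
      pvSumLcp l (l.drop i) = ((List.range' i (l.length - i)).map (pvZ l)).sum by
    intro i hi; exact H _ i rfl hi
  intro fuel
  induction fuel with
  | zero =>
    intro i hf hi
    have hi' : i = l.length := by omega
    subst hi'
    simp [pvSumLcp]
  | succ fuel ih =>
    intro i hf hi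
    have hlt : i < l.length := by omega
    have hcons : l.drop i = l[i] :: l.drop (i + 1) := List.drop_eq_getElem_cons hlt
    rw [show l.length - i = (l.length - (i + 1)) + 1 from by omega, List.range'_succ,
      List.map_cons, List.sum_cons, ← ih (i + 1) (by omega) (by omega)]
    conv_lhs => rw [hcons]
    simp only [pvSumLcp]
    rw [← hcons]
    rfl

theorem pvFoldSum (pa : List Nat) (l : List Char)
    (hpa : ∀ j, 1 ≤ j → j < l.length → pa.getD j 0 = pvZ l j) :
    ∀ (js : List Nat) (n₀ : Nat), (∀ j ∈ js, 1 ≤ j ∧ j < l.length) →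
    js.foldl (fun t i => t + pa.getD i 0) n₀ = n₀ + (js.map (pvZ l)).sum := by
  intro js
  induction js with
  | nil => intro n₀ _; simp
  | cons j js ih =>
    intro n₀ hmem
    simp only [List.foldl_cons, List.map_cons, List.sum_cons]
    rw [hpa j (hmem j (by simp)).1 (hmem j (by simp)).2,
      ih (n₀ + pvZ l j) (fun x hx => hmem x (by simp [hx]))]
    omega

-- ===== VERDICT (by name: the statement is the Claim_ definition above) =====
theorem commonPrefixSum_spec : Claim_equal_commonPrefixSum := by
  intro s _
  unfold Spec_commonPrefixSum commonPrefixSum commonPrefixSum_alt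
  dsimp only
  set l := s.toList with hl
  by_cases h0 : l.length = 0
  · have hnil : l = [] := List.eq_nil_of_length_eq_zero h0
    simp [hnil, pvSumLcp]
  · have hn1 : 1 ≤ l.length := by omega
    have hrange : List.range l.length = 0 :: List.range' 1 (l.length - 1) := by
      rw [List.range_eq_range']
      conv_lhs => rw [show l.length = (l.length - 1) + 1 from by omega]
      rw [List.range'_succ]
    have hstep0 : pvStepA l (List.replicate l.length 0, 0, 0) 0 = (List.replicate l.length 0, 0, 0) := by
      obtain ⟨m, hm⟩ : ∃ m, l.length = m + 1 := ⟨l.length - 1, by omega⟩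
      rw [hm]
      simp [pvStepA, List.replicate_succ]
    have hinv1 : pvInv l 1 (List.replicate l.length 0, 0, 0) := by
      refine ⟨hn1, by simp, ?_, Or.inl ⟨rfl, rfl, rfl⟩⟩
      intro j
      have hz : (List.replicate l.length (0 : Nat)).getD j 0 = 0 := by
        simp only [List.getD_eq_getElem?_getD, List.getElem?_replicate]
        split <;> rfl
      rw [hz]
      split_ifs with h
      · omega
      · rfl
    have hfold := pvFold_inv l (l.length - 1) 1 _ hinv1 (le_refl 1) (by omega)
    rw [show 1 + (l.length - 1) = l.length from by omega] at hfold
    rw [hrange, List.foldl_cons, hstep0]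
    rcases hst : (List.range' 1 (l.length - 1)).foldl (pvStepA l) (List.replicate l.length 0, 0, 0)
      with ⟨pa, lf, rf⟩
    rw [hst] at hfold
    obtain ⟨-, hlen, hpa, -⟩ := hfold
    dsimp only at hlen hpa
    have hsum := pvFoldSum pa l
      (fun j hj1 hj2 => by rw [hpa j, if_pos ⟨hj1, hj2⟩])
      (List.range' 1 (l.length - 1)) l.length
      (fun j hj => by rw [List.mem_range'] at hj; omega)
    dsimp only
    rw [hsum]
    have hb : pvSumLcp l l = ((List.range' 0 l.length).map (pvZ l)).sum := by
      have := pvSumLcp_eq l 0 (by omega)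
      simpa using this
    rw [hb, ← List.range_eq_range', hrange, List.map_cons, List.sum_cons, pvZ_zero]
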